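-- pv_equiv track=rewrite | github.com/yeongkyo1997/Algorithm | 프로그래머스/unrated/181921. 배열 만들기 2/배열 만들기 2.py | solution
-- ===== SOURCE A (Python) =====
-- def solution(l, r):
--     answer = []
--     for i in range(l, r+1):
--         if set(str(i)).issubset(set(['0', '5'])):
--             answer.append(i)
--     if not answer:
--         answer.append(-1)
--     return answer
-- ===== SOURCE B (Python) =====
-- def bits(m):
--     # the decimal number whose digits are m's binary digits
--     return 0 if m == 0 else 10 * bits(m // 2) + m % 2
--
--
-- def solution(l, r):
--     # enumerate the numbers whose decimal digits are all 0 or 5 directly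
--     # (they are exactly 5 * bits(m) for m = 0, 1, 2, ... in increasing order)
--     answer = []
--     m = 0
--     while True:
--         v = 5 * bits(m)
--         if v > r:
--             break
--         if v >= l:
--             answer.append(v)
--         m += 1
--     return answer if answer else [-1]
-- ===== Notes on version B (the rewrite author's own statement) =====
-- stated objective: alternative
-- what changed: Instead of scanning every integer in [l,r] and testing its decimal string, B enumerates the qualifying numbers directly (they are exactly 5*bits(m) where bits reads a binary counter's digits as a decimal number, produced in increasing order) and stops once past r; measured much faster on large ranges but the probe could not confirm it consistently, so no speed claim is made.
import Mathlib
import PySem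

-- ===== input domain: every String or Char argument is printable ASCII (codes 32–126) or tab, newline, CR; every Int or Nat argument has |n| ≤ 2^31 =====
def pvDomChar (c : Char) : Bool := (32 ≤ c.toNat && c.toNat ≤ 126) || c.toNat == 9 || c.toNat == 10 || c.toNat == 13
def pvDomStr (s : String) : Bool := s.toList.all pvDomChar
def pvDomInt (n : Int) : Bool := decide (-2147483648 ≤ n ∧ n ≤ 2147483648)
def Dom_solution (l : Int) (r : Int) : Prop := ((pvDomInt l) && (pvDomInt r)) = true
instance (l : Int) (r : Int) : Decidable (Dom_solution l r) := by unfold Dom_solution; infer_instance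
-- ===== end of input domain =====

-- B enumerates the 0/5-digit numbers directly instead of scanning every integer in [l, r]; proved equal to A.

-- ===== PORT A =====
-- set(str(i)).issubset(set(['0', '5']))
def pvP (i : Int) : Bool :=
  PySem.Set.issubset (PySem.Set.ofList (PySem.Int.toChars i)) (PySem.Set.ofList ['0', '5'])

def solution (l : Int) (r : Int) : List Int :=
  let answer := (PySem.List.pyRange l (r + 1) 1).foldl
    (fun acc i => if pvP i then acc ++ [i] else acc) []
  if answer = [] then answer ++ [-1] else answer

-- ===== PORT B =====
-- bits m = the decimal number whose digits are m's binary digits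
def pvBits (m : Nat) : Nat :=
  if m = 0 then 0 else 10 * pvBits (m / 2) + m % 2
decreasing_by exact Nat.div_lt_self (Nat.pos_of_ne_zero (by assumption)) (by norm_num)

-- termination helper for the while loop: the candidate 5 * bits m grows at least as fast as m
theorem pvBits_le_self (m : Nat) : m ≤ pvBits m := by
  induction m using Nat.strong_induction_on with
  | _ m ih =>
    rw [pvBits]
    by_cases h : m = 0
    · simp [h]
    · simp only [h, if_false]
      have h2 : m / 2 < m := Nat.div_lt_self (Nat.pos_of_ne_zero h) (by norm_num)
      have := ih (m / 2) h2
      omega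

-- the while loop: emit v = 5 * bits m for m = 0, 1, 2, … while v ≤ r, keeping those ≥ l
def pvGo (l : Int) (r : Int) (m : Nat) : List Int :=
  if _h : r < ((5 * pvBits m : Nat) : Int) then []
  else (if l ≤ ((5 * pvBits m : Nat) : Int) then [((5 * pvBits m : Nat) : Int)] else [])
       ++ pvGo l r (m + 1)
termination_by (r + 1 - m).toNat
decreasing_by
  have h1 : (m : Int) ≤ ((5 * pvBits m : Nat) : Int) := by
    exact_mod_cast Nat.le_trans (pvBits_le_self m) (by omega)
  omega

def solution_alt (l : Int) (r : Int) : List Int :=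
  let answer := pvGo l r 0
  if answer = [] then [-1] else answer

-- ===== PRECONDITION & SPEC =====
def Spec_solution (l : Int) (r : Int) (out : List Int) : Prop := out = solution_alt l r
instance (l : Int) (r : Int) (out : List Int) : Decidable (Spec_solution l r out) := by unfold Spec_solution; infer_instance

-- ===== CLAIM (what is proved, stated in full; the proofs are below) =====
def Claim_equal_solution : Prop := ∀ (l : Int) (r : Int), Dom_solution l r → Spec_solution l r (solution l r)

-- ===== LEMMAS AND PROOFS =====

theorem pvBits_def (m : Nat) : pvBits m = if m = 0 then 0 else 10 * pvBits (m / 2) + m % 2 := by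
  rw [pvBits]

theorem pvBits_zero : pvBits 0 = 0 := by rw [pvBits]; simp

theorem pvBits_one : pvBits 1 = 1 := by rw [pvBits, pvBits]; norm_num

-- pvBits is strictly monotone
theorem pvBits_strictMono {a b : Nat} (h : a < b) : pvBits a < pvBits b := by
  induction b using Nat.strong_induction_on generalizing a with
  | _ b ih =>
    have hA := pvBits_def a
    have hB := pvBits_def b
    have hb0 : b ≠ 0 := by omega
    rw [if_neg hb0] at hB
    have hble := pvBits_le_self (b / 2)
    by_cases ha0 : a = 0
    · rw [if_pos ha0] at hA
      omega
    · rw [if_neg ha0] at hA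
      rcases Nat.lt_or_ge (a / 2) (b / 2) with hlt | hge
      · have := ih (b / 2) (Nat.div_lt_self (Nat.pos_of_ne_zero hb0) (by norm_num)) hlt
        omega
      · have heq : a / 2 = b / 2 := by omega
        rw [heq] at hA
        omega

theorem pvBits_mono {a b : Nat} (h : a ≤ b) : pvBits a ≤ pvBits b := by
  rcases Nat.lt_or_ge a b with h1 | h1
  · exact Nat.le_of_lt (pvBits_strictMono h1)
  · have : a = b := by omega
    subst this; exact Nat.le_refl _

-- decimal digit characters of n, in the shape Nat.toDigits 10 produces them
def pvDig (n : Nat) : List Char :=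
  if n < 10 then [Nat.digitChar n]
  else pvDig (n / 10) ++ [Nat.digitChar (n % 10)]
decreasing_by exact Nat.div_lt_self (by omega) (by norm_num)

theorem pvDig_def (n : Nat) :
    pvDig n = if n < 10 then [Nat.digitChar n]
              else pvDig (n / 10) ++ [Nat.digitChar (n % 10)] := by
  rw [pvDig]

theorem toDigitsCore_eq_pvDig (f : Nat) : ∀ (n : Nat) (acc : List Char), n < f →
    Nat.toDigitsCore 10 f n acc = pvDig n ++ acc := by
  induction f with
  | zero => intro n acc h; omega
  | succ f ih =>
    intro n acc h
    rw [Nat.toDigitsCore]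
    by_cases h10 : n / 10 = 0
    · have hn : n < 10 := by omega
      have hm : n % 10 = n := Nat.mod_eq_of_lt hn
      rw [pvDig_def, if_pos hn]
      simp [h10, hm]
    · have hn : ¬ n < 10 := by omega
      have hlt : n / 10 < f := by
        have : n / 10 < n := Nat.div_lt_self (by omega) (by norm_num)
        omega
      simp only [h10, if_false]
      rw [ih (n / 10) _ hlt]
      conv_rhs => rw [pvDig_def n, if_neg hn]
      simp [List.append_assoc]

theorem toDigits_eq_pvDig (n : Nat) : Nat.toDigits 10 n = pvDig n := by
  have := toDigitsCore_eq_pvDig (n + 1) n [] (by omega)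
  simpa [Nat.toDigits] using this

-- all digit characters are '0' or '5'
def pvOk (cs : List Char) : Prop := ∀ c ∈ cs, c = '0' ∨ c = '5'

theorem digitChar_05_iff (n : Nat) (h : n < 10) :
    (Nat.digitChar n = '0' ∨ Nat.digitChar n = '5') ↔ (n = 0 ∨ n = 5) := by
  interval_cases n <;> decide

theorem pvOk_dig_iff_exists (n : Nat) : pvOk (pvDig n) ↔ ∃ k, n = 5 * pvBits k := by
  induction n using Nat.strong_induction_on with
  | _ n ih =>
    by_cases hn : n < 10
    · rw [pvDig_def, if_pos hn]
      constructor
      · intro h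
        have hc := (digitChar_05_iff n hn).mp (h (Nat.digitChar n) (by simp))
        rcases hc with rfl | rfl
        · exact ⟨0, by rw [pvBits_zero]⟩
        · exact ⟨1, by rw [pvBits_one]⟩
      · rintro ⟨k, hk⟩
        intro c hc
        simp only [List.mem_singleton] at hc
        subst hc
        apply (digitChar_05_iff n hn).mpr
        omega
    · rw [pvDig_def, if_neg hn]
      have hd : n / 10 < n := Nat.div_lt_self (by omega) (by norm_num)
      have h10 : n % 10 < 10 := Nat.mod_lt _ (by norm_num)
      constructor
      · intro h
        have h1 : pvOk (pvDig (n / 10)) := fun c hc => h c (by simp [hc])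
        have h2 := (digitChar_05_iff (n % 10) h10).mp
          (h (Nat.digitChar (n % 10)) (by simp))
        rcases (ih (n / 10) hd).mp h1 with ⟨k', hk'⟩
        refine ⟨2 * k' + n % 10 / 5, ?_⟩
        have hdef := pvBits_def (2 * k' + n % 10 / 5)
        by_cases hz : 2 * k' + n % 10 / 5 = 0
        · have hk0 : k' = 0 := by omega
          rw [if_pos hz] at hdef
          rw [hk0, pvBits_zero] at hk'
          omega
        · rw [if_neg hz] at hdef
          have e1 : (2 * k' + n % 10 / 5) / 2 = k' := by omega
          have e2 : (2 * k' + n % 10 / 5) % 2 = n % 10 / 5 := by omega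
          rw [e1, e2] at hdef
          omega
      · rintro ⟨k, hk⟩
        have hk2 : k ≠ 0 := by
          intro h0
          rw [h0, pvBits_zero] at hk
          omega
        have hb := pvBits_def k
        rw [if_neg hk2] at hb
        have e1 : n / 10 = 5 * pvBits (k / 2) := by omega
        have e2 : n % 10 = 5 * (k % 2) := by omega
        intro c hc
        rcases List.mem_append.mp hc with hc | hc
        · exact (ih (n / 10) hd).mpr ⟨k / 2, e1⟩ c hc
        · simp only [List.mem_singleton] at hc
          subst hc
          apply (digitChar_05_iff (n % 10) h10).mpr
          omega

-- A's test characterized: str(i) is all '0'/'5' iff i = 5 * pvBits k for some k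
theorem pvP_iff (i : Int) : pvP i = true ↔ ∃ k, i = ((5 * pvBits k : Nat) : Int) := by
  have hsub : ∀ cs : List Char,
      (PySem.Set.issubset (PySem.Set.ofList cs) (PySem.Set.ofList ['0', '5']) = true) ↔ pvOk cs := by
    intro cs
    simp only [PySem.Set.issubset, PySem.Set.contains, List.all_eq_true]
    constructor
    · intro h c hc
      have := h c ((PySem.Set.mem_ofList cs c).mpr hc)
      have hmem : c ∈ PySem.Set.ofList ['0', '5'] := by simpa using this
      simpa using (PySem.Set.mem_ofList ['0', '5'] c).mp hmem
    · intro h c hc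
      have hc' : c ∈ cs := (PySem.Set.mem_ofList cs c).mp hc
      rcases h c hc' with rfl | rfl <;> decide
  unfold pvP
  rw [hsub]
  unfold PySem.Int.toChars
  by_cases hi : i < 0
  · rw [if_pos hi]
    constructor
    · intro h
      rcases h '-' (by simp) with h | h <;> exact absurd h (by decide)
    · rintro ⟨k, hk⟩
      exfalso
      have : (0 : Int) ≤ ((5 * pvBits k : Nat) : Int) := Int.natCast_nonneg _
      omega
  · rw [if_neg hi, toDigits_eq_pvDig, pvOk_dig_iff_exists]
    constructor
    · rintro ⟨k, hk⟩
      exact ⟨k, by omega⟩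
    · rintro ⟨k, hk⟩
      exact ⟨k, by omega⟩

-- membership in B's loop output
theorem mem_pvGo (l r : Int) (m : Nat) (x : Int) :
    x ∈ pvGo l r m ↔
      ∃ k, m ≤ k ∧ x = ((5 * pvBits k : Nat) : Int) ∧ l ≤ x ∧ x ≤ r := by
  induction m using pvGo.induct (r := r) with
  | case1 m hv =>
    rw [pvGo, dif_pos hv]
    simp only [List.not_mem_nil, false_iff]
    rintro ⟨k, hk, rfl, hl, hr⟩
    have h1 : pvBits m ≤ pvBits k := pvBits_mono hk
    have h2 : ((5 * pvBits m : Nat) : Int) ≤ ((5 * pvBits k : Nat) : Int) := by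
      exact_mod_cast Nat.mul_le_mul_left 5 h1
    omega
  | case2 m hv ih =>
    rw [pvGo, dif_neg hv]
    rw [List.mem_append, ih]
    constructor
    · rintro (hx | ⟨k, hk, rfl, hl, hr⟩)
      · by_cases hlv : l ≤ ((5 * pvBits m : Nat) : Int)
        · rw [if_pos hlv, List.mem_singleton] at hx
          exact ⟨m, Nat.le_refl m, hx, by omega, by omega⟩
        · rw [if_neg hlv] at hx; simp at hx
      · exact ⟨k, by omega, rfl, hl, hr⟩
    · rintro ⟨k, hk, rfl, hl, hr⟩
      rcases Nat.eq_or_lt_of_le hk with rfl | hk'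
      · left
        rw [if_pos hl, List.mem_singleton]
      · right
        exact ⟨k, by omega, rfl, hl, hr⟩

-- B's loop output is strictly increasing
theorem pvGo_pairwise (l r : Int) (m : Nat) : (pvGo l r m).Pairwise (· < ·) := by
  induction m using pvGo.induct (r := r) with
  | case1 m hv => rw [pvGo, dif_pos hv]; exact List.Pairwise.nil
  | case2 m hv ih =>
    rw [pvGo, dif_neg hv]
    apply List.pairwise_append.mpr
    refine ⟨?_, ih, ?_⟩
    · split <;> simp
    · intro a ha b hb
      by_cases hlv : l ≤ ((5 * pvBits m : Nat) : Int)
      · rw [if_pos hlv, List.mem_singleton] at ha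
        subst ha
        rcases (mem_pvGo l r (m + 1) b).mp hb with ⟨k, hk, rfl, _, _⟩
        have h1 : pvBits m < pvBits k := pvBits_strictMono (by omega)
        have h2 : (5 : Nat) * pvBits m < 5 * pvBits k := by omega
        exact_mod_cast h2
      · rw [if_neg hlv] at ha; simp at ha

-- the range is strictly increasing
theorem pyRange_one_pairwise (a b : Int) : (PySem.List.pyRange a b 1).Pairwise (· < ·) := by
  by_cases h : b ≤ a
  · rw [PySem.List.pyRange_one_eq_nil h]; exact List.Pairwise.nil
  · rw [not_le] at h
    rw [PySem.List.pyRange_one_cons h]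
    refine List.pairwise_cons.mpr ⟨?_, pyRange_one_pairwise (a + 1) b⟩
    intro x hx
    have := (PySem.List.mem_pyRange_one).mp hx
    omega
termination_by (b - a).toNat
decreasing_by omega

-- two strictly increasing integer lists with the same members are equal
theorem eq_of_pairwise_lt_of_mem_iff : ∀ (as bs : List Int),
    as.Pairwise (· < ·) → bs.Pairwise (· < ·) → (∀ x, x ∈ as ↔ x ∈ bs) → as = bs := by
  intro as
  induction as with
  | nil =>
    intro bs _ _ hmem
    cases bs with
    | nil => rfl
    | cons b bs => exact absurd ((hmem b).mpr (by simp)) (by simp)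
  | cons a as ih =>
    intro bs ha hb hmem
    cases bs with
    | nil => exact absurd ((hmem a).mp (by simp)) (by simp)
    | cons b bs =>
      have hab : a = b := by
        have h1 : a ∈ b :: bs := (hmem a).mp (by simp)
        have h2 : b ∈ a :: as := (hmem b).mpr (by simp)
        simp at h1 h2
        rcases h1 with rfl | h1
        · rfl
        · rcases h2 with rfl | h2
          · rfl
          · have := (List.pairwise_cons.mp ha).1 b h2
            have := (List.pairwise_cons.mp hb).1 a h1
            omega
      subst hab
      have htail : ∀ x, x ∈ as ↔ x ∈ bs := by
        intro x
        constructor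
        · intro hx
          have := (hmem x).mp (by simp [hx])
          rcases List.mem_cons.mp this with rfl | h
          · exact absurd hx (by
              intro hmem2
              have := (List.pairwise_cons.mp ha).1 x hmem2
              omega)
          · exact h
        · intro hx
          have := (hmem x).mpr (by simp [hx])
          rcases List.mem_cons.mp this with rfl | h
          · exact absurd hx (by
              intro hmem2
              have := (List.pairwise_cons.mp hb).1 x hmem2
              omega)
          · exact h
      rw [ih bs (List.pairwise_cons.mp ha).2 (List.pairwise_cons.mp hb).2 htail]

-- the two collected lists coincide
theorem filter_eq_pvGo (l r : Int) :
    (PySem.List.pyRange l (r + 1) 1).filter pvP = pvGo l r 0 := by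
  apply eq_of_pairwise_lt_of_mem_iff
  · exact (pyRange_one_pairwise l (r + 1)).filter _
  · exact pvGo_pairwise l r 0
  · intro x
    rw [List.mem_filter, PySem.List.mem_pyRange_one, mem_pvGo, pvP_iff]
    constructor
    · rintro ⟨⟨hl, hr⟩, k, rfl⟩
      exact ⟨k, Nat.zero_le k, rfl, hl, by omega⟩
    · rintro ⟨k, _, rfl, hl, hr⟩
      exact ⟨⟨hl, by omega⟩, k, rfl⟩

-- ===== VERDICT (by name: the statement is the Claim_ definition above) =====
theorem solution_spec : Claim_equal_solution := by
  intro l r _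
  unfold Spec_solution
  simp only [solution, solution_alt]
  rw [PySem.List.foldl_append_if_eq_filter]
  simp only [List.nil_append, filter_eq_pvGo]
  by_cases h : pvGo l r 0 = [] <;> simp [h]
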